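-- pv_equiv track=rewrite | github.com/Joseph-Maulin/Post_Here_Classifier | test.py | odd_string_count
-- ===== SOURCE A (Python) =====
-- def odd_string_count(s):
--
--     cache = {}
--     if len(s) == 1:
--         return cache
--
--     i = 1
--     while i<len(s):
--         if s[i] in cache.keys():
--             cache[s[i]] += 1
--
--         else:
--             cache[s[i]] = 1
--
--         i+=2
--
--     i = 0
--     while i<len(s):
--         if s[i] in cache.keys():
--             cache[s[i]] += 1
--
--         i+=2
--
--     return cache
-- ===== SOURCE B (Python) =====
-- def odd_string_count(s):
--     odd = {}
--     even = {}
--     for i, c in enumerate(s):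
--         d = even if i % 2 == 0 else odd
--         d[c] = d.get(c, 0) + 1
--     return {c: n + even.get(c, 0) for c, n in odd.items()}
-- ===== Notes on version B (the rewrite author's own statement) =====
-- stated objective: simpler
-- what changed: Replaces the two index-stepping while loops with conditional dict membership tests by one enumerate pass building separate odd- and even-index counters, combined afterwards by a comprehension in the odd counter's insertion order; the len(s)==1 guard disappears.
import Mathlib
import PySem

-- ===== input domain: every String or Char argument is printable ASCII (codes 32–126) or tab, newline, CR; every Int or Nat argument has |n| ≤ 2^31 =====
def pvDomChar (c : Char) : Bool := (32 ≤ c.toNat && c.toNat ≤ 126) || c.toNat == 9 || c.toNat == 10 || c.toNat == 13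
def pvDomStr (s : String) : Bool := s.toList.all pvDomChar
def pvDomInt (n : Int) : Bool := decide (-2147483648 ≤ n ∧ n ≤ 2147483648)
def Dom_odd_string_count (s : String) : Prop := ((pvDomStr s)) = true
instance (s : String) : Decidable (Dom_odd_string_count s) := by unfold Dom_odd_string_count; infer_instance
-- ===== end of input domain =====

-- B replaces A's two conditional index-stepping while loops by one enumerate pass building
-- two counters (odd/even indices) combined afterwards — simpler, same asymptotic cost.


-- ===== PORT A =====
-- s[i] is ported as pyGetD over s.toList (the loop indices stay in range); the one-char
-- Python string s[i] is String.mk [·].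
def odd_string_count (s : String) : List (String × Int) :=
  let cache : PySem.Dict String Int := PySem.Dict.empty
  if PySem.Str.len s = 1 then cache.items
  else
    let cs := s.toList
    let cache := (PySem.List.pyRange 1 (PySem.Str.len s) 2).foldl
      (fun d i =>
        let ch : String := String.mk [PySem.List.pyGetD cs i ' ']
        if d.contains ch then d.modify ch 0 (· + 1) else d.insert ch 1) cache
    let cache := (PySem.List.pyRange 0 (PySem.Str.len s) 2).foldl
      (fun d i =>
        let ch : String := String.mk [PySem.List.pyGetD cs i ' ']
        if d.contains ch then d.modify ch 0 (· + 1) else d) cache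
    cache.items

-- ===== PORT B =====
-- the loop body of B's enumerate pass (state = (odd, even))
def pvBStep (p : PySem.Dict String Int × PySem.Dict String Int) (ic : Int × String) :
    PySem.Dict String Int × PySem.Dict String Int :=
  if PySem.Int.mod ic.1 2 = 0
  then (p.1, p.2.insert ic.2 (p.2.getD ic.2 0 + 1))
  else (p.1.insert ic.2 (p.1.getD ic.2 0 + 1), p.2)

def odd_string_count_alt (s : String) : List (String × Int) :=
  let chars := s.toList.map (fun c => String.mk [c])
  let p := (PySem.List.enumerate chars 0).foldl pvBStep (PySem.Dict.empty, PySem.Dict.empty)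
  p.1.items.map (fun q => (q.1, q.2 + p.2.getD q.1 0))

-- ===== PRECONDITION & SPEC =====
def Spec_odd_string_count (s : String) (out : List (String × Int)) : Prop := out = odd_string_count_alt s
instance (s : String) (out : List (String × Int)) : Decidable (Spec_odd_string_count s out) := by unfold Spec_odd_string_count; infer_instance

-- ===== CLAIM (what is proved, stated in full; the proofs are below) =====
def Claim_equal_odd_string_count : Prop := ∀ (s : String), Dom_odd_string_count s → Spec_odd_string_count s (odd_string_count s)

-- ===== LEMMAS AND PROOFS =====

-- every other element of a list, starting at the head (indices 0, 2, 4, …)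
def everyOther {α : Type} : List α → List α
  | [] => []
  | [x] => [x]
  | x :: _ :: t => x :: everyOther t

theorem everyOther_cons {α : Type} (x : α) (t : List α) :
    everyOther (x :: t) = x :: everyOther t.tail := by
  cases t <;> simp [everyOther]

theorem everyOther_map {α β : Type} (f : α → β) : ∀ (l : List α),
    everyOther (l.map f) = (everyOther l).map f
  | [] => by simp [everyOther]
  | [x] => by simp [everyOther]
  | x :: y :: t => by simp [everyOther, everyOther_map f t]

theorem pyRange_two_cons (a b : Int) (h : a < b) :
    PySem.List.pyRange a b 2 = a :: PySem.List.pyRange (a + 2) b 2 := by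
  rw [PySem.List.pyRange_of_pos a b (by norm_num), PySem.List.pyRange_of_pos (a + 2) b (by norm_num)]
  by_cases h2 : a + 2 < b
  · have hn : ((b - a + 2 - 1) / 2).toNat = ((b - (a + 2) + 2 - 1) / 2).toNat + 1 := by omega
    simp only [if_pos h, if_pos h2, hn, List.range_succ_eq_map, List.map_cons, List.map_map]
    congr 1
    · norm_num
    · apply List.map_congr_left; intro k _; simp [Function.comp]; ring
  · have hn : ((b - a + 2 - 1) / 2).toNat = 1 := by omega
    simp [if_pos h, if_neg h2, hn, List.range_succ]

theorem map_get_pyRange_two {α : Type} (cs : List α) (d : α) (a : Int) (h0 : 0 ≤ a) :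
    (PySem.List.pyRange a (cs.length : Int) 2).map (fun i => PySem.List.pyGetD cs i d)
      = everyOther (cs.drop a.toNat) := by
  by_cases h : a < (cs.length : Int)
  · have hlt : a.toNat < cs.length := by omega
    rw [pyRange_two_cons a _ h, List.map_cons,
        map_get_pyRange_two cs d (a + 2) (by omega)]
    have hdrop : cs.drop a.toNat = cs[a.toNat] :: cs.drop (a.toNat + 1) :=
      List.drop_eq_getElem_cons hlt
    have hget : PySem.List.pyGetD cs a d = cs[a.toNat] := by
      rw [PySem.List.pyGetD_of_nonneg cs d h0]
      simp [List.getD_eq_getElem?_getD, List.getElem?_eq_getElem hlt]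
    have htn : (a + 2).toNat = a.toNat + 2 := by omega
    rw [hget, htn, hdrop, everyOther_cons]
    simp
  · have h1 : PySem.List.pyRange a (cs.length : Int) 2 = [] := by
      rw [PySem.List.pyRange_of_pos a _ (by norm_num)]
      simp [if_neg h]
    have h2 : cs.drop a.toNat = [] := List.drop_eq_nil_of_le (by omega)
    rw [h1, h2]; simp [everyOther]
termination_by (cs.length - a.toNat)
decreasing_by omega

-- A's first loop body is exactly the Counter step
theorem phase1_body (d : PySem.Dict String Int) (c : String) :
    (if d.contains c then d.modify c 0 (· + 1) else d.insert c 1) = d.modify c 0 (· + 1) := by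
  by_cases h : d.contains c = true
  · rw [if_pos h]
  · rw [if_neg h, PySem.Dict.modify,
        PySem.Dict.getD_of_not_contains d 0 (by simpa using h)]
    norm_num

-- A's second loop maps each stored count up by the number of occurrences in l
theorem phase2_items : ∀ (l : List String) (d : PySem.Dict String Int), d.keys.Nodup →
    (l.foldl (fun d c => if d.contains c then d.modify c 0 (· + 1) else d) d).items
      = d.items.map (fun p => (p.1, p.2 + (l.count p.1 : Int)))
  | [], d, _ => by simp
  | c :: t, d, hnd => by
    rw [List.foldl_cons]
    have hstep : (if d.contains c then d.modify c 0 (· + 1) else d).items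
        = d.items.map (fun p => (p.1, p.2 + if p.1 == c then (1 : Int) else 0)) := by
      by_cases h : d.contains c = true
      · rw [if_pos h, PySem.Dict.modify, PySem.Dict.items_insert_of_contains _ _ h]
        apply List.map_congr_left; intro p hp
        by_cases hpc : (p.1 == c) = true
        · have hpc' : p.1 = c := by simpa using hpc
          have : d.getD c 0 = p.2 := by
            rw [← hpc']
            exact PySem.Dict.getD_of_mem_items d (by simpa using hp) hnd 0
          simp [hpc', this]
        · simp [hpc]
      · rw [if_neg h]
        have hne : ∀ p ∈ d.items, (p.1 == c) = false := by
          intro p hp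
          cases hbc : (p.1 == c) with
          | false => rfl
          | true =>
            exfalso
            have hpc : p.1 = c := by simpa using hbc
            have hk : c ∈ d.keys := hpc ▸ PySem.Dict.mem_keys_of_mem_items d hp
            rw [← PySem.Dict.contains_iff_mem_keys] at hk
            exact h hk
        conv_lhs => rw [show d.items = d.items.map id from (List.map_id d.items).symm]
        apply List.map_congr_left; intro p hp
        simp [hne p hp]
    have hnd' : (if d.contains c then d.modify c 0 (· + 1) else d).keys.Nodup := by
      by_cases h : d.contains c = true
      · rw [if_pos h, PySem.Dict.keys_modify, PySem.Dict.keys_insert_of_contains _ _ h]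
        exact hnd
      · rw [if_neg h]; exact hnd
    rw [phase2_items t _ hnd', hstep, List.map_map]
    apply List.map_congr_left; intro p _
    simp only [Function.comp, List.count_cons, Prod.mk.injEq]
    refine ⟨trivial, ?_⟩
    by_cases h : p.1 = c
    · rw [if_pos (by simp [h]), if_pos (by simp [h])]
      push_cast; ring
    · rw [if_neg (by simp [h]), if_neg (by simp [Ne.symm h])]
      push_cast; ring

-- B's single pass splits into the two counters, by parity of the start index
theorem enum_fold : ∀ (l : List String) (n : Int) (o e : PySem.Dict String Int),
    (PySem.List.enumerate l n).foldl pvBStep (o, e)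
      = if PySem.Int.mod n 2 = 0
        then (((everyOther l.tail).foldl (fun d c => d.insert c (d.getD c 0 + 1)) o),
              ((everyOther l).foldl (fun d c => d.insert c (d.getD c 0 + 1)) e))
        else (((everyOther l).foldl (fun d c => d.insert c (d.getD c 0 + 1)) o),
              ((everyOther l.tail).foldl (fun d c => d.insert c (d.getD c 0 + 1)) e))
  | [], n, o, e => by simp [PySem.List.enumerate, everyOther]
  | x :: t, n, o, e => by
    have hmod : PySem.Int.mod n 2 = n % 2 := PySem.Int.mod_eq_emod_of_pos (by norm_num)
    have hmod1 : PySem.Int.mod (n + 1) 2 = (n + 1) % 2 := PySem.Int.mod_eq_emod_of_pos (by norm_num)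
    rw [PySem.List.enumerate_cons, List.foldl_cons]
    by_cases h : n % 2 = 0
    · have h1 : ¬ (PySem.Int.mod (n + 1) 2 = 0) := by rw [hmod1]; omega
      have hx : pvBStep (o, e) (n, x) = (o, e.insert x (e.getD x 0 + 1)) := by
        simp [pvBStep, h]
      rw [hx, enum_fold t (n + 1) o _, if_neg h1,
          if_pos (show PySem.Int.mod n 2 = 0 by rw [hmod]; exact h), everyOther_cons]
      simp
    · have h1 : PySem.Int.mod (n + 1) 2 = 0 := by rw [hmod1]; omega
      have hx : pvBStep (o, e) (n, x) = (o.insert x (o.getD x 0 + 1), e) := by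
        simp [pvBStep, h]
      rw [hx, enum_fold t (n + 1) _ e, if_pos h1,
          if_neg (show ¬ PySem.Int.mod n 2 = 0 by rw [hmod]; exact h), everyOther_cons]
      simp

-- ===== VERDICT (by name: the statement is the Claim_ definition above) =====
theorem odd_string_count_spec : Claim_equal_odd_string_count := by
  intro s _
  unfold Spec_odd_string_count odd_string_count odd_string_count_alt
  simp only [PySem.Str.len_eq, enum_fold, if_pos (show PySem.Int.mod 0 2 = 0 from rfl),
    ← List.map_tail, everyOther_map, PySem.Dict.foldl_insert_getD_add_one_eq_counter,
    PySem.Dict.getD_counter]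
  by_cases hlen : (s.toList.length : Int) = 1
  · rw [if_pos hlen]
    obtain ⟨c, hc⟩ := List.length_eq_one_iff.mp (by exact_mod_cast hlen)
    rw [hc]
    rfl
  · rw [if_neg hlen]
    have hmap1 : (PySem.List.pyRange 1 (s.toList.length : Int) 2).map
        (fun i => String.mk [PySem.List.pyGetD s.toList i ' '])
        = (everyOther s.toList.tail).map (fun c => String.mk [c]) := by
      rw [show (fun i => String.mk [PySem.List.pyGetD s.toList i ' '])
            = (fun c => String.mk [c]) ∘ (fun i => PySem.List.pyGetD s.toList i ' ') from rfl,
          ← List.map_map, map_get_pyRange_two s.toList ' ' 1 (by norm_num)]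
      simp [List.drop_one]
    have hmap0 : (PySem.List.pyRange 0 (s.toList.length : Int) 2).map
        (fun i => String.mk [PySem.List.pyGetD s.toList i ' '])
        = (everyOther s.toList).map (fun c => String.mk [c]) := by
      rw [show (fun i => String.mk [PySem.List.pyGetD s.toList i ' '])
            = (fun c => String.mk [c]) ∘ (fun i => PySem.List.pyGetD s.toList i ' ') from rfl,
          ← List.map_map, map_get_pyRange_two s.toList ' ' 0 (by norm_num)]
      simp
    have hfold1 : ∀ (l : List Int) (init : PySem.Dict String Int),
        l.foldl (fun d i =>
            if d.contains (String.mk [PySem.List.pyGetD s.toList i ' ']) = true then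
              d.modify (String.mk [PySem.List.pyGetD s.toList i ' ']) 0 (· + 1)
            else d.insert (String.mk [PySem.List.pyGetD s.toList i ' ']) 1) init
        = (l.map (fun i => String.mk [PySem.List.pyGetD s.toList i ' '])).foldl
            (fun d ch => if d.contains ch = true then d.modify ch 0 (· + 1)
              else d.insert ch 1) init := by
      intro l init; rw [List.foldl_map]
    have hfold0 : ∀ (l : List Int) (init : PySem.Dict String Int),
        l.foldl (fun d i =>
            if d.contains (String.mk [PySem.List.pyGetD s.toList i ' ']) = true then
              d.modify (String.mk [PySem.List.pyGetD s.toList i ' ']) 0 (· + 1)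
            else d) init
        = (l.map (fun i => String.mk [PySem.List.pyGetD s.toList i ' '])).foldl
            (fun d ch => if d.contains ch = true then d.modify ch 0 (· + 1) else d) init := by
      intro l init; rw [List.foldl_map]
    rw [hfold1, hmap1, hfold0, hmap0,
        PySem.List.foldl_congr_mem _ _ (fun d c => d.modify c 0 (· + 1)) _
          (fun acc x _ => phase1_body acc x),
        ← PySem.Dict.counter_eq_foldl,
        phase2_items _ _ (PySem.Dict.nodup_keys_counter _)]
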